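-- pv_equiv track=rewrite | github.com/tbtrung39/KHDL_K17A1_LAB | lab10/pk_b6/doicoso2.py | phat_hien_co_so
-- ===== SOURCE A (Python) =====
-- def phat_hien_co_so(chuoi):
--     """Cho biết chuỗi số cho trước là biểu diễn cơ số mấy"""
--     chuoi = chuoi.upper()
--     if all(c in '01' for c in chuoi):
--         return 2
--     elif all(c in '01234567' for c in chuoi):
--         return 8
--     elif all(c in '0123456789ABCDEF' for c in chuoi):
--         return 16
--     elif all(c in '0123456789' for c in chuoi):
--         return 10
--     else:
--         return -1
-- ===== SOURCE B (Python) =====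
-- def phat_hien_co_so(chuoi):
--     """Cho biết chuỗi số cho trước là biểu diễn cơ số mấy"""
--     # Single pass: each character is ranked by the smallest base whose alphabet
--     # contains it (hex before decimal, as in the original's branch order), the
--     # answer is the running maximum; an invalid character exits with -1 at once.
--     m = 2
--     for c in chuoi:
--         if c in '01':
--             r = 2
--         elif c in '234567':
--             r = 8
--         elif c in '89ABCDEFabcdef':
--             r = 16
--         else:
--             return -1
--         if r > m:
--             m = r
--     return m
-- ===== Notes on version B (the rewrite author's own statement) =====
-- stated objective: alternative
-- what changed: Replaces A's four repeated full-string all()-membership scans (after uppercasing the whole string) by a single left-to-right pass that ranks each character by the smallest base whose alphabet contains it, keeps a running maximum, and exits with -1 as soon as an invalid character is seen; no uppercased copy of the string is built.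
import Mathlib
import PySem

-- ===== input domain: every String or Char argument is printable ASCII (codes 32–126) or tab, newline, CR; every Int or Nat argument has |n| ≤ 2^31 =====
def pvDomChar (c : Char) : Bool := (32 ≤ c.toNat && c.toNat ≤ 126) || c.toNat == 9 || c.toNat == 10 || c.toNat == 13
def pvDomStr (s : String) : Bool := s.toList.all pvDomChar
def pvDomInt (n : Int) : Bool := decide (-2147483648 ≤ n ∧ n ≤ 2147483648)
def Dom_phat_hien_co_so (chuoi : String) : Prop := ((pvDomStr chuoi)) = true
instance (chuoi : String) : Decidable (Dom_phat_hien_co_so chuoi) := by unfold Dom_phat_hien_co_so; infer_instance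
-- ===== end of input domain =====

-- B replaces A's four repeated full-string membership scans by ONE left-to-right pass that
-- ranks each character by the smallest base whose alphabet contains it and keeps a running
-- maximum, exiting immediately with -1 on an invalid character (objective: alternative).

-- ===== PORT A =====
-- A: uppercase the string, then test all(c in alphabet) for each alphabet in order.
def phat_hien_co_so (chuoi : String) : Int :=
  let u := (PySem.Str.upper chuoi).toList
  if u.all (fun c => ("01".toList).contains c) then 2
  else if u.all (fun c => ("01234567".toList).contains c) then 8
  else if u.all (fun c => ("0123456789ABCDEF".toList).contains c) then 16
  else if u.all (fun c => ("0123456789".toList).contains c) then 10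
  else -1

-- ===== PORT B =====
-- B: one pass with a running maximum rank; early exit -1 on an invalid character.
def pvAltGo : List Char → Int → Int
  | [], m => m
  | c :: rest, m =>
    if ("01".toList).contains c then
      pvAltGo rest (if (2 : Int) > m then 2 else m)
    else if ("234567".toList).contains c then
      pvAltGo rest (if (8 : Int) > m then 8 else m)
    else if ("89ABCDEFabcdef".toList).contains c then
      pvAltGo rest (if (16 : Int) > m then 16 else m)
    else -1

def phat_hien_co_so_alt (chuoi : String) : Int := pvAltGo chuoi.toList 2

-- ===== PRECONDITION & SPEC =====
def Spec_phat_hien_co_so (chuoi : String) (out : Int) : Prop := out = phat_hien_co_so_alt chuoi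
instance (chuoi : String) (out : Int) : Decidable (Spec_phat_hien_co_so chuoi out) := by unfold Spec_phat_hien_co_so; infer_instance

-- ===== CLAIM (what is proved, stated in full; the proofs are below) =====
def Claim_equal_phat_hien_co_so : Prop := ∀ (chuoi : String), Dom_phat_hien_co_so chuoi → Spec_phat_hien_co_so chuoi (phat_hien_co_so chuoi)

-- ===== LEMMAS AND PROOFS =====

-- arithmetic (code-point) versions of the character classes, used only in the proofs
def pvBinB (c : Char) : Bool := 48 ≤ c.toNat && c.toNat ≤ 49
def pvOctB (c : Char) : Bool := 48 ≤ c.toNat && c.toNat ≤ 55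
def pvHexB (c : Char) : Bool :=
  (48 ≤ c.toNat && c.toNat ≤ 57) || (65 ≤ c.toNat && c.toNat ≤ 70) || (97 ≤ c.toNat && c.toNat ≤ 102)
def pvDecB (c : Char) : Bool := 48 ≤ c.toNat && c.toNat ≤ 57

theorem char_eq_iff_toNat (c d : Char) : c = d ↔ c.toNat = d.toNat := by
  constructor
  · rintro rfl; rfl
  · intro h; exact Char.ext (UInt32.toNat_inj.mp h)

theorem char_le_iff (c d : Char) : (c ≤ d) ↔ c.toNat ≤ d.toNat := by
  rw [Char.le_def, UInt32.le_iff_toNat_le]; rfl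

theorem toNat_upperChar (c : Char) :
    (PySem.Chars.upperChar c).toNat = if 97 ≤ c.toNat ∧ c.toNat ≤ 122 then c.toNat - 32 else c.toNat := by
  unfold PySem.Chars.upperChar PySem.Chars.islower
  by_cases h : 97 ≤ c.toNat ∧ c.toNat ≤ 122
  · rw [if_pos h, if_pos, Char.toNat_ofNat, if_pos]
    · left; omega
    · simp only [Bool.and_eq_true, decide_eq_true_eq, char_le_iff]; exact h
  · rw [if_neg h, if_neg]
    simp only [Bool.and_eq_true, decide_eq_true_eq, char_le_iff]
    exact h

-- membership in B's (disjoint) alphabets, arithmetically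
theorem mem_bin (c : Char) : ("01".toList).contains c = (48 ≤ c.toNat && c.toNat ≤ 49) := by
  rw [Bool.eq_iff_iff]
  rw [show "01".toList = ['0', '1'] from rfl]
  simp only [List.contains_iff_mem, List.mem_cons, List.not_mem_nil, or_false,
    char_eq_iff_toNat, Char.reduceToNat, Bool.and_eq_true, decide_eq_true_eq]
  omega

theorem mem_234567 (c : Char) : ("234567".toList).contains c = (50 ≤ c.toNat && c.toNat ≤ 55) := by
  rw [Bool.eq_iff_iff]
  rw [show "234567".toList = ['2', '3', '4', '5', '6', '7'] from rfl]
  simp only [List.contains_iff_mem, List.mem_cons, List.not_mem_nil, or_false,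
    char_eq_iff_toNat, Char.reduceToNat, Bool.and_eq_true, decide_eq_true_eq]
  omega

theorem mem_hexrest (c : Char) :
    ("89ABCDEFabcdef".toList).contains c =
      ((56 ≤ c.toNat && c.toNat ≤ 57) || (65 ≤ c.toNat && c.toNat ≤ 70) || (97 ≤ c.toNat && c.toNat ≤ 102)) := by
  rw [Bool.eq_iff_iff]
  rw [show "89ABCDEFabcdef".toList = ['8', '9', 'A', 'B', 'C', 'D', 'E', 'F', 'a', 'b', 'c', 'd', 'e', 'f'] from rfl]
  simp only [List.contains_iff_mem, List.mem_cons, List.not_mem_nil, or_false,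
    char_eq_iff_toNat, Char.reduceToNat, Bool.or_eq_true, Bool.and_eq_true, decide_eq_true_eq]
  omega

-- membership of upperChar c in A's alphabets equals the arithmetic class of c
theorem upper_bin (c : Char) : ("01".toList).contains (PySem.Chars.upperChar c) = pvBinB c := by
  rw [Bool.eq_iff_iff]
  rw [show "01".toList = ['0', '1'] from rfl]
  simp only [List.contains_iff_mem, List.mem_cons, List.not_mem_nil, or_false,
    char_eq_iff_toNat, Char.reduceToNat, toNat_upperChar, pvBinB, Bool.and_eq_true, decide_eq_true_eq]
  split_ifs <;> omega

theorem upper_oct (c : Char) : ("01234567".toList).contains (PySem.Chars.upperChar c) = pvOctB c := by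
  rw [Bool.eq_iff_iff]
  rw [show "01234567".toList = ['0', '1', '2', '3', '4', '5', '6', '7'] from rfl]
  simp only [List.contains_iff_mem, List.mem_cons, List.not_mem_nil, or_false,
    char_eq_iff_toNat, Char.reduceToNat, toNat_upperChar, pvOctB, Bool.and_eq_true, decide_eq_true_eq]
  split_ifs <;> omega

theorem upper_hex (c : Char) : ("0123456789ABCDEF".toList).contains (PySem.Chars.upperChar c) = pvHexB c := by
  rw [Bool.eq_iff_iff]
  rw [show "0123456789ABCDEF".toList = ['0', '1', '2', '3', '4', '5', '6', '7', '8', '9', 'A', 'B', 'C', 'D', 'E', 'F'] from rfl]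
  simp only [List.contains_iff_mem, List.mem_cons, List.not_mem_nil, or_false,
    char_eq_iff_toNat, Char.reduceToNat, toNat_upperChar, pvHexB, Bool.or_eq_true, Bool.and_eq_true, decide_eq_true_eq]
  split_ifs <;> omega

theorem upper_dec (c : Char) : ("0123456789".toList).contains (PySem.Chars.upperChar c) = pvDecB c := by
  rw [Bool.eq_iff_iff]
  rw [show "0123456789".toList = ['0', '1', '2', '3', '4', '5', '6', '7', '8', '9'] from rfl]
  simp only [List.contains_iff_mem, List.mem_cons, List.not_mem_nil, or_false,
    char_eq_iff_toNat, Char.reduceToNat, toNat_upperChar, pvDecB, Bool.and_eq_true, decide_eq_true_eq]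
  split_ifs <;> omega

theorem all_imp {p q : Char → Bool} (h : ∀ c, p c = true → q c = true) (l : List Char)
    (hl : l.all p = true) : l.all q = true := by
  simp only [List.all_eq_true] at *
  exact fun c hc => h c (hl c hc)

-- the running-maximum loop computes the if-chain over the cumulative classes
theorem pvAltGo_spec (l : List Char) : ∀ (m : Int), 2 ≤ m →
    pvAltGo l m =
      if l.all pvBinB then max m 2
      else if l.all pvOctB then max m 8
      else if l.all pvHexB then max m 16
      else -1 := by
  induction l with
  | nil => intro m hm; simp [pvAltGo]; omega
  | cons c rest ih =>
    intro m hm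
    unfold pvAltGo
    rw [mem_bin, mem_234567, mem_hexrest]
    simp only [List.all_cons, pvBinB, pvOctB, pvHexB]
    by_cases h1 : (48 ≤ c.toNat && c.toNat ≤ 49) = true
    · rw [if_pos h1, ih _ (by split_ifs <;> omega)]
      have h2 : (48 ≤ c.toNat && c.toNat ≤ 55) = true := by
        simp only [Bool.and_eq_true, decide_eq_true_eq] at *; omega
      have h3 : ((48 ≤ c.toNat && c.toNat ≤ 57) || (65 ≤ c.toNat && c.toNat ≤ 70) ||
          (97 ≤ c.toNat && c.toNat ≤ 102)) = true := by
        simp only [Bool.or_eq_true, Bool.and_eq_true, decide_eq_true_eq] at *; omega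
      simp only [h1, h2, h3, Bool.true_and]
      simp only [max_def]; split_ifs <;> omega
    · rw [if_neg h1]
      simp only [h1, Bool.false_and, if_neg Bool.false_ne_true]
      by_cases h2 : (50 ≤ c.toNat && c.toNat ≤ 55) = true
      · rw [if_pos h2, ih _ (by split_ifs <;> omega)]
        have ho : (48 ≤ c.toNat && c.toNat ≤ 55) = true := by
          simp only [Bool.and_eq_true, decide_eq_true_eq] at *; omega
        have hh : ((48 ≤ c.toNat && c.toNat ≤ 57) || (65 ≤ c.toNat && c.toNat ≤ 70) ||
            (97 ≤ c.toNat && c.toNat ≤ 102)) = true := by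
          simp only [Bool.or_eq_true, Bool.and_eq_true, decide_eq_true_eq] at *; omega
        simp only [ho, hh, Bool.true_and]
        by_cases hb : rest.all pvBinB = true
        · have hbo : rest.all pvOctB = true := by
            refine all_imp ?_ rest hb
            intro d hd
            simp only [pvBinB, pvOctB, Bool.and_eq_true, decide_eq_true_eq] at *; omega
          simp only [hb, hbo, if_true]
          simp only [max_def]; split_ifs <;> omega
        · rw [if_neg hb]
          simp only [max_def]; split_ifs <;> omega
      · rw [if_neg h2]
        by_cases h3 : ((56 ≤ c.toNat && c.toNat ≤ 57) || (65 ≤ c.toNat && c.toNat ≤ 70) ||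
            (97 ≤ c.toNat && c.toNat ≤ 102)) = true
        · rw [if_pos h3, ih _ (by split_ifs <;> omega)]
          have ho : (48 ≤ c.toNat && c.toNat ≤ 55) = false := by
            simp only [Bool.or_eq_true, Bool.and_eq_true, decide_eq_true_eq, Bool.and_eq_false_iff,
              decide_eq_false_iff_not] at *
            omega
          have hh : ((48 ≤ c.toNat && c.toNat ≤ 57) || (65 ≤ c.toNat && c.toNat ≤ 70) ||
              (97 ≤ c.toNat && c.toNat ≤ 102)) = true := by
            simp only [Bool.or_eq_true, Bool.and_eq_true, decide_eq_true_eq] at *; omega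
          simp only [ho, hh, Bool.false_and, Bool.true_and, if_neg Bool.false_ne_true]
          have i1 : rest.all pvBinB = true → rest.all pvHexB = true := fun hb =>
            all_imp (fun d hd => by
              simp only [pvBinB, pvHexB, Bool.or_eq_true, Bool.and_eq_true,
                decide_eq_true_eq] at *; omega) rest hb
          have i2 : rest.all pvOctB = true → rest.all pvHexB = true := fun hb =>
            all_imp (fun d hd => by
              simp only [pvOctB, pvHexB, Bool.or_eq_true, Bool.and_eq_true,
                decide_eq_true_eq] at *; omega) rest hb
          simp only [max_def]
          split_ifs <;> simp_all <;> omega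
        · rw [if_neg h3]
          have ho : (48 ≤ c.toNat && c.toNat ≤ 55) = false := by
            simp only [Bool.or_eq_true, Bool.and_eq_true, decide_eq_true_eq,
              Bool.and_eq_false_iff, decide_eq_false_iff_not] at *
            omega
          have hh : ((48 ≤ c.toNat && c.toNat ≤ 57) || (65 ≤ c.toNat && c.toNat ≤ 70) ||
              (97 ≤ c.toNat && c.toNat ≤ 102)) = false := by
            simp only [Bool.or_eq_true, Bool.and_eq_true, decide_eq_true_eq,
              Bool.or_eq_false_iff, Bool.and_eq_false_iff, decide_eq_false_iff_not] at *
            omega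
          simp [ho, hh]

-- ===== VERDICT (by name: the statement is the Claim_ definition above) =====
theorem phat_hien_co_so_spec : Claim_equal_phat_hien_co_so := by
  intro chuoi _
  unfold Spec_phat_hien_co_so phat_hien_co_so phat_hien_co_so_alt
  rw [PySem.Str.toList_upper]
  unfold PySem.Chars.upper
  simp only [List.all_map, Function.comp_def, upper_bin, upper_oct, upper_hex, upper_dec]
  rw [pvAltGo_spec _ _ (by omega)]
  by_cases h1 : chuoi.toList.all pvBinB = true
  · simp [h1]
  · rw [if_neg h1, if_neg h1]
    by_cases h2 : chuoi.toList.all pvOctB = true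
    · simp [h2]
    · rw [if_neg h2, if_neg h2]
      by_cases h3 : chuoi.toList.all pvHexB = true
      · simp [h3]
      · rw [if_neg h3, if_neg h3]
        have hd : ¬ chuoi.toList.all pvDecB = true := by
          intro hdec
          exact h3 (all_imp (fun c hc => by
            simp only [pvDecB, pvHexB, Bool.or_eq_true, Bool.and_eq_true, decide_eq_true_eq] at *
            omega) _ hdec)
        rw [if_neg hd]
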